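-- pv_equiv track=rewrite | github.com/flo-bou/adventofcode24 | day6/day6_part1.py | to_East
-- ===== SOURCE A (Python) =====
-- def to_East(carte: list, guard_position: list):
--     # trouver le prochain '#' dans la direction de déplacement du garde
--     positions_traveled: set = set()
--     after_guard: bool = False
--     final_guard_position: list = list()
--     for char_index, char in enumerate(carte[guard_position[0]]):
--         # trouver la position du garde sur la ligne :
--         if char_index == guard_position[1]:
--             after_guard = True
--             continue
--         if after_guard:
--             if char == "#":
--                 final_guard_position = [guard_position[0], char_index-1]
--                 break
--             else:
--                 positions_traveled.add((guard_position[0], char_index))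
--     # # si aucun '#' n'a été atteint, alors le garde est sorti de la carte
--     # if final_guard_position == []:
--     #     final_guard_position = None
--     return final_guard_position, "South", positions_traveled
-- ===== SOURCE B (Python) =====
-- def to_East(carte: list, guard_position: list):
--     # Two separate phases: find the first wall east of the guard in the row
--     # slice, then build the traveled cells as one range comprehension.
--     r = guard_position[0]
--     row = carte[r]
--     c = guard_position[1]
--     offset = None
--     for k, ch in enumerate(row[c + 1:]):
--         if ch == "#":
--             offset = k
--             break
--     if offset is None:
--         final, end = [], len(row)
--     else:
--         final, end = [r, c + offset], c + 1 + offset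
--     return final, "South", {(r, k) for k in range(c + 1, end)}
-- ===== Notes on version B (the rewrite author's own statement) =====
-- stated objective: simpler
-- what changed: Replaces A's single-pass state machine (after_guard flag, break, incremental set.add) by two separate phases: find the first '#' in the row slice east of the guard, then build the traveled cells as one range comprehension.
-- outside the precondition, e.g. on to_East([[]], [0]): A returns ([], 'South', set()), B raises IndexError; on to_East([['#']], [0, -1]): A returns ([], 'South', set()), B returns ([0, -1], 'South', set())
import Mathlib
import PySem

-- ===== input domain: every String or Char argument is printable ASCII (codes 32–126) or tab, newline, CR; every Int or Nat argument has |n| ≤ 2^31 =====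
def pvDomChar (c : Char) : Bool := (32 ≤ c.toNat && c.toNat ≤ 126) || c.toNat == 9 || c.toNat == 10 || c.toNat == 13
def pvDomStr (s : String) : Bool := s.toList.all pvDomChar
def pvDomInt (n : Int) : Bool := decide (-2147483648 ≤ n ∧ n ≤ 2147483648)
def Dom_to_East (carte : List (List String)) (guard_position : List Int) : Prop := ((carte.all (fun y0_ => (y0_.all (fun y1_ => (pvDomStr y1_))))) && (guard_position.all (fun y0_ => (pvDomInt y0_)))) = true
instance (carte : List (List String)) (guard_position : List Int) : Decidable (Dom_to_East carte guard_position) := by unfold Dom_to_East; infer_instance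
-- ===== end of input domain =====

-- B rewrites A's single-pass state machine as two separate phases (wall search on the row slice, then a range comprehension); equivalence is about the return value only.

-- ===== PORT A =====
-- A's for-loop over enumerate(row) with the after_guard flag and break, as structural recursion
-- carrying the running index j, the flag, and the traveled set.
def toEastLoopA (r c : Int) : List String → Nat → Bool → List (Int × Int) → List Int × String × (List (Int × Int))
  | [], _, _, trav => ([], "South", trav)
  | ch :: rest, j, after, trav =>
    if (j : Int) = c then toEastLoopA r c rest (j + 1) true trav
    else if after then
      if ch = "#" then ([r, (j : Int) - 1], "South", trav)
      else toEastLoopA r c rest (j + 1) after (PySem.Set.add trav (r, (j : Int)))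
    else toEastLoopA r c rest (j + 1) after trav

def to_East (carte : List (List String)) (guard_position : List Int) : List Int × String × (List (Int × Int)) :=
  match PySem.List.pyGet? guard_position 0 with
  | none => ([], "South", [])        -- IndexError (outside Pre_)
  | some g0 =>
    match PySem.List.pyGet? carte g0 with
    | none => ([], "South", [])      -- IndexError (outside Pre_)
    | some row =>
      match PySem.List.pyGet? guard_position 1 with
      | none => ([], "South", [])    -- IndexError on a nonempty row (outside Pre_)
      | some g1 => toEastLoopA g0 g1 row 0 false PySem.Set.empty

-- ===== PORT B =====
-- Source B's first-'#' search (enumerate with break over the slice), as structural recursion.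
def findHashB : List String → Option Nat
  | [] => none
  | ch :: rest => if ch = "#" then some 0 else (findHashB rest).map (· + 1)

def to_East_alt (carte : List (List String)) (guard_position : List Int) : List Int × String × (List (Int × Int)) :=
  match PySem.List.pyGet? guard_position 0 with
  | none => ([], "South", [])        -- IndexError (outside Pre_)
  | some r =>
    match PySem.List.pyGet? carte r with
    | none => ([], "South", [])      -- IndexError (outside Pre_)
    | some row =>
      match PySem.List.pyGet? guard_position 1 with
      | none => ([], "South", [])    -- IndexError (outside Pre_)
      | some c =>
        let tail := PySem.List.slice row (some (c + 1)) none
        let (final, stop) :=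
          match findHashB tail with
          | none => (([] : List Int), (row.length : Int))
          | some off => ([r, c + (off : Int)], c + 1 + (off : Int))
        (final, "South",
          PySem.Set.ofList ((PySem.List.pyRange (c + 1) stop 1).map (fun k => (r, k))))

-- ===== PRECONDITION & SPEC =====
-- Pre_ excludes the inputs on which A raises IndexError (guard_position shorter than 2 —
-- where A still returns only when the row is empty and B raises — or a row index out of range),
-- and inputs with a negative guard column: there the guard lies on no cell of the row, neither
-- behaviour is specified (A's equality scan finds no guard and returns an empty path, B's
-- slice counts from the row's end).
def Pre_to_East (carte : List (List String)) (guard_position : List Int) : Prop :=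
  2 ≤ guard_position.length ∧
  PySem.Raise.InRange carte.length (guard_position.getD 0 0) ∧
  0 ≤ guard_position.getD 1 0
instance (carte : List (List String)) (guard_position : List Int) : Decidable (Pre_to_East carte guard_position) := by unfold Pre_to_East; infer_instance

def pvWitness_to_East : List (List String) × List Int := ([[".", "#"]], [0, 0])

def Spec_to_East (carte : List (List String)) (guard_position : List Int) (out : List Int × String × (List (Int × Int))) : Prop := out = to_East_alt carte guard_position
instance (carte : List (List String)) (guard_position : List Int) (out : List Int × String × (List (Int × Int))) : Decidable (Spec_to_East carte guard_position out) := by unfold Spec_to_East; infer_instance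

-- ===== CLAIM (what is proved, stated in full; the proofs are below) =====
def Claim_equal_to_East : Prop := ∀ (carte : List (List String)) (guard_position : List Int), Dom_to_East carte guard_position → Pre_to_East carte guard_position → Spec_to_East carte guard_position (to_East carte guard_position)

-- ===== LEMMAS AND PROOFS =====

-- A's traveled set, rebuilt as a fold of Set.add over a list of column indices.
def travAdd (r : Int) (trav : List (Int × Int)) (js : List Int) : List (Int × Int) :=
  js.foldl (fun s j => PySem.Set.add s (r, j)) trav

-- After the guard has been passed (after = true, c < j), A's loop is the wall search plus a range of additions.
theorem toEastLoopA_post (r c : Int) :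
    ∀ (l : List String) (j : Nat) (trav : List (Int × Int)), c < (j : Int) →
      toEastLoopA r c l j true trav =
        match findHashB l with
        | some k => ([r, (j : Int) + (k : Int) - 1], "South",
            travAdd r trav (PySem.List.pyRange (j : Int) ((j : Int) + (k : Int)) 1))
        | none => ([], "South",
            travAdd r trav (PySem.List.pyRange (j : Int) ((j : Int) + (l.length : Int)) 1)) := by
  intro l
  induction l with
  | nil =>
    intro j trav hj
    simp [toEastLoopA, findHashB, travAdd, PySem.List.pyRange_one_eq_nil]
  | cons ch rest ih =>
    intro j trav hj
    have hne : ((j : Nat) : Int) ≠ c := by omega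
    by_cases hch : ch = "#"
    · simp [toEastLoopA, hne, hch, findHashB, travAdd, PySem.List.pyRange_one_eq_nil]
    · have step : toEastLoopA r c (ch :: rest) j true trav
          = toEastLoopA r c rest (j + 1) true (PySem.Set.add trav (r, (j : Int))) := by
        simp [toEastLoopA, hne, hch]
      rw [step, ih (j + 1) (PySem.Set.add trav (r, (j : Int))) (by push_cast; omega)]
      have hfh : findHashB (ch :: rest) = (findHashB rest).map (· + 1) := by
        simp [findHashB, hch]
      rw [hfh]
      cases hfr : findHashB rest with
      | none =>
        simp only [Option.map_none]
        have hrange : PySem.List.pyRange (j : Int) ((j : Int) + ((ch :: rest).length : Int)) 1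
            = (j : Int) :: PySem.List.pyRange ((j : Int) + 1) ((j : Int) + ((ch :: rest).length : Int)) 1 := by
          apply PySem.List.pyRange_one_cons; simp
        rw [hrange]
        simp only [travAdd, List.foldl_cons, List.length_cons]
        have e1 : ((j + 1 : Nat) : Int) = (j : Int) + 1 := by push_cast; ring
        have e2 : ((rest.length + 1 : Nat) : Int) = (rest.length : Int) + 1 := by push_cast; ring
        have e3 : (j : Int) + 1 + (rest.length : Int) = (j : Int) + ((rest.length : Int) + 1) := by ring
        rw [e1, e2, e3]
      | some k =>
        simp only [Option.map_some]
        have hrange : PySem.List.pyRange (j : Int) ((j : Int) + ((k + 1 : Nat) : Int)) 1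
            = (j : Int) :: PySem.List.pyRange ((j : Int) + 1) ((j : Int) + ((k + 1 : Nat) : Int)) 1 := by
          apply PySem.List.pyRange_one_cons; push_cast; omega
        rw [hrange]
        simp only [travAdd, List.foldl_cons]
        have e1 : ((j + 1 : Nat) : Int) = (j : Int) + 1 := by push_cast; ring
        have e2 : ((k + 1 : Nat) : Int) = (k : Int) + 1 := by push_cast; ring
        have e3 : (j : Int) + 1 + (k : Int) = (j : Int) + ((k : Int) + 1) := by ring
        rw [e1, e2, e3]

-- Before the guard column (after = false, j ≤ c), A's loop drops everything up to column c
-- and then behaves as the post phase starting at column c+1.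
theorem toEastLoopA_pre (r c : Int) (hc : 0 ≤ c) :
    ∀ (l : List String) (j : Nat) (trav : List (Int × Int)), (j : Int) ≤ c →
      toEastLoopA r c l j false trav =
        match findHashB (l.drop (c.toNat + 1 - j)) with
        | some k => ([r, (c + 1) + (k : Int) - 1], "South",
            travAdd r trav (PySem.List.pyRange (c + 1) (c + 1 + (k : Int)) 1))
        | none => ([], "South",
            travAdd r trav (PySem.List.pyRange (c + 1) (c + 1 + ((l.drop (c.toNat + 1 - j)).length : Int)) 1)) := by
  intro l
  induction l with
  | nil =>
    intro j trav hj
    simp [toEastLoopA, findHashB, travAdd, PySem.List.pyRange_one_eq_nil]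
  | cons ch rest ih =>
    intro j trav hj
    by_cases hjc : ((j : Nat) : Int) = c
    · have hdrop : (ch :: rest).drop (c.toNat + 1 - j) = rest := by
        have : c.toNat + 1 - j = 1 := by omega
        rw [this]; simp
      have step : toEastLoopA r c (ch :: rest) j false trav
          = toEastLoopA r c rest (j + 1) true trav := by
        simp [toEastLoopA, hjc]
      rw [step, toEastLoopA_post r c rest (j + 1) trav (by push_cast; omega), hdrop]
      have e1 : ((j + 1 : Nat) : Int) = c + 1 := by push_cast; omega
      rw [e1]
    · have hlt : (j : Int) < c := lt_of_le_of_ne hj hjc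
      have step : toEastLoopA r c (ch :: rest) j false trav
          = toEastLoopA r c rest (j + 1) false trav := by
        simp [toEastLoopA, hjc]
      rw [step, ih (j + 1) trav (by push_cast; omega)]
      have hdrop : (ch :: rest).drop (c.toNat + 1 - j) = rest.drop (c.toNat + 1 - (j + 1)) := by
        have h1 : c.toNat + 1 - j = (c.toNat + 1 - (j + 1)) + 1 := by omega
        rw [h1]; simp
      rw [hdrop]

theorem travAdd_nil (r : Int) (js : List Int) :
    travAdd r [] js = PySem.Set.ofList (js.map (fun k => (r, k))) := by
  simp [travAdd, PySem.Set.ofList_eq_foldl, List.foldl_map]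

-- ===== VERDICT (by name: the statement is the Claim_ definition above) =====
theorem to_East_spec : Claim_equal_to_East := by
  intro carte gp _ hpre
  obtain ⟨hlen, hin, hc⟩ := hpre
  match gp, hlen with
  | g0 :: g1 :: rest, _ =>
    simp only [List.getD_cons_zero, List.getD_cons_succ] at hin hc
    unfold Spec_to_East to_East to_East_alt
    have h0 : PySem.List.pyGet? (g0 :: g1 :: rest) 0 = some g0 :=
      PySem.List.pyGet?_zero_cons _ _
    have h1 : PySem.List.pyGet? (g0 :: g1 :: rest) 1 = some g1 := by
      have h := PySem.List.pyGet?_cons_succ (x := g0) (xs := g1 :: rest) (n := 0)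
      simp only [Nat.cast_zero, zero_add] at h
      rw [h, PySem.List.pyGet?_zero_cons]
    cases hr : PySem.List.pyGet? carte g0 with
    | none => exact absurd hin (by rwa [PySem.List.pyGet?_eq_none_iff] at hr)
    | some row =>
      have htail : PySem.List.slice row (some (g1 + 1)) none = row.drop (g1.toNat + 1) := by
        simp [PySem.List.slice_some_none]
        rw [show g1 + 1 = ((g1.toNat + 1 : Nat) : Int) by omega, PySem.List.clampIdx_natCast]
      have hmain := toEastLoopA_pre g0 g1 hc row 0 [] (by exact_mod_cast hc)
      simp only [Nat.sub_zero] at hmain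
      simp only [h0, h1, hr, htail]
      rw [show (PySem.Set.empty : List (Int × Int)) = [] from rfl, hmain]
      cases hfh : findHashB (row.drop (g1.toNat + 1)) with
      | some off =>
        simp only []
        rw [travAdd_nil]
        have e1 : g1 + 1 + (off : Int) - 1 = g1 + (off : Int) := by ring
        rw [e1]
      | none =>
        simp only []
        rw [travAdd_nil]
        have e2 : PySem.List.pyRange (g1 + 1) (g1 + 1 + ((row.drop (g1.toNat + 1)).length : Int)) 1
            = PySem.List.pyRange (g1 + 1) (row.length : Int) 1 := by
          rcases Nat.lt_or_ge row.length (g1.toNat + 1) with h | h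
          · rw [PySem.List.pyRange_one_eq_nil (by simp [List.length_drop]; omega),
                PySem.List.pyRange_one_eq_nil (by omega)]
          · congr 1
            simp [List.length_drop]
            omega
        rw [e2]
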